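-- pv_equiv track=rewrite | github.com/Authentiquo/LeoForge | src/services/builder.py | parse_error_details
-- ===== SOURCE A (Python) =====
-- from typing import Optional, List
--
-- def parse_error_details(stderr: str) -> List[dict]:
--     """Parse compilation errors for detailed information"""
--     errors = []
--     current_error = None
--
--     for line in stderr.splitlines():
--         if "error:" in line:
--             if current_error:
--                 errors.append(current_error)
--             current_error = {
--                 "message": line.split("error:", 1)[1].strip(),
--                 "location": "",
--                 "suggestion": ""
--             }
--         elif "-->" in line and current_error:
--             current_error["location"] = line.strip()
--         elif "help:" in line and current_error:
--             current_error["suggestion"] = line.split("help:", 1)[1].strip()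
--
--     if current_error:
--         errors.append(current_error)
--
--     return errors
-- ===== SOURCE B (Python) =====
-- from typing import List
--
-- def parse_error_details(stderr: str) -> List[dict]:
--     """Parse compilation errors for detailed information (group-then-render)."""
--     # Pass 1: group the lines into error blocks, one per "error:" header line;
--     # lines before the first header are dropped.
--     groups = []
--     for line in stderr.splitlines():
--         if "error:" in line:
--             groups.append([line])
--         elif groups:
--             groups[-1].append(line)
--     # Pass 2: render each block into its detail dict.
--     result = []
--     for header, *body in groups:
--         location = ""
--         suggestion = ""
--         for ln in body:
--             if "-->" in ln:
--                 location = ln.strip()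
--             elif "help:" in ln:
--                 suggestion = ln.split("help:", 1)[1].strip()
--         result.append({
--             "message": header.split("error:", 1)[1].strip(),
--             "location": location,
--             "suggestion": suggestion,
--         })
--     return result
-- ===== Notes on version B (the rewrite author's own statement) =====
-- stated objective: alternative
-- what changed: Replaces A's single-pass fold over an optional mutable current-error dict with a two-phase pipeline: first group the lines into blocks (one per 'error:' header), then render each block independently with a small (location, suggestion) accumulator.
import Mathlib
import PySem

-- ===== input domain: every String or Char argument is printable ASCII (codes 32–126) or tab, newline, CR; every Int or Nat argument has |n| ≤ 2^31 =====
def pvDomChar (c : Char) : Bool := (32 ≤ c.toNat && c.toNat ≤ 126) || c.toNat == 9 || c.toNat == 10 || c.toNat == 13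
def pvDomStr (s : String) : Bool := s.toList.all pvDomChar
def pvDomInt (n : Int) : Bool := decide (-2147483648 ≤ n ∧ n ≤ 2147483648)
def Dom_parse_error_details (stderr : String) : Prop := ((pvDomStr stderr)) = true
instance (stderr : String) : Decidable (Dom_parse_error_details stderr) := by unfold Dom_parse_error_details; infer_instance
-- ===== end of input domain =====

-- B groups the lines into error blocks first and renders each block separately,
-- instead of A's one fold threading an optional in-progress dict. (objective: alternative)

-- shared helpers: expressions that occur verbatim in BOTH Pythons
-- '"error:" in line'
def pvErrTest (line : String) : Bool := PySem.Str.isIn "error:" line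
-- 'line.split("error:", 1)[1].strip()' (only evaluated under the guard '"error:" in line', so [1] exists)
def pvErrMsg (line : String) : String :=
  PySem.Str.strip (((PySem.Str.splitMax? line "error:" 1).getD []).getD 1 "")
-- 'line.split("help:", 1)[1].strip()' (only evaluated under '"help:" in line')
def pvHelpMsg (line : String) : String :=
  PySem.Str.strip (((PySem.Str.splitMax? line "help:" 1).getD []).getD 1 "")

-- ===== PORT A =====
-- the dict literal A builds at each "error:" line
def pvNewErr (line : String) : PySem.Dict String String :=
  PySem.Dict.mk [("message", pvErrMsg line), ("location", ""), ("suggestion", "")]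

-- A's loop body; state = (errors, current_error)
def pvStepA (s : List (PySem.Dict String String) × Option (PySem.Dict String String))
    (line : String) : List (PySem.Dict String String) × Option (PySem.Dict String String) :=
  if pvErrTest line then
    ((match s.2 with | some c => s.1 ++ [c] | none => s.1), some (pvNewErr line))
  else if PySem.Str.isIn "-->" line && s.2.isSome then
    (s.1, s.2.map (fun c => c.insert "location" (PySem.Str.strip line)))
  else if PySem.Str.isIn "help:" line && s.2.isSome then
    (s.1, s.2.map (fun c => c.insert "suggestion" (pvHelpMsg line)))
  else s

def parse_error_details (stderr : String) : List (List (String × String)) :=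
  let s := (PySem.Str.splitlines stderr).foldl pvStepA ([], none)
  (match s.2 with | some c => s.1 ++ [c] | none => s.1).map PySem.Dict.items

-- ===== PORT B =====
-- 'groups[-1].append(line)'
def pvAppendLast (gs : List (String × List String)) (line : String) :
    List (String × List String) :=
  match gs with
  | [] => []
  | [g] => [(g.1, g.2 ++ [line])]
  | g :: rest => g :: pvAppendLast rest line

-- pass 1 loop body: start a new block at each header, else append to the last block
def pvGroupStep (gs : List (String × List String)) (line : String) :
    List (String × List String) :=
  if pvErrTest line then gs ++ [(line, [])]
  else if gs.isEmpty then gs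
  else pvAppendLast gs line

-- pass 2 inner loop body over a block's body lines; state = (location, suggestion)
def pvRenderBody (st : String × String) (ln : String) : String × String :=
  if PySem.Str.isIn "-->" ln then (PySem.Str.strip ln, st.2)
  else if PySem.Str.isIn "help:" ln then (st.1, pvHelpMsg ln)
  else st

-- pass 2: one block -> one detail dict (as its item list)
def pvRender (g : String × List String) : List (String × String) :=
  let p := g.2.foldl pvRenderBody ("", "")
  [("message", pvErrMsg g.1), ("location", p.1), ("suggestion", p.2)]

def parse_error_details_alt (stderr : String) : List (List (String × String)) :=
  (((PySem.Str.splitlines stderr).foldl pvGroupStep []).map pvRender)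

-- ===== PRECONDITION & SPEC =====
def Spec_parse_error_details (stderr : String) (out : List (List (String × String))) : Prop := out = parse_error_details_alt stderr
instance (stderr : String) (out : List (List (String × String))) : Decidable (Spec_parse_error_details stderr out) := by unfold Spec_parse_error_details; infer_instance

-- ===== CLAIM (what is proved, stated in full; the proofs are below) =====
def Claim_equal_parse_error_details : Prop := ∀ (stderr : String), Dom_parse_error_details stderr → Spec_parse_error_details stderr (parse_error_details stderr)

-- ===== LEMMAS AND PROOFS =====

-- A's finishing step (append the pending dict, then take item lists)
def pvOutA (s : List (PySem.Dict String String) × Option (PySem.Dict String String)) :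
    List (List (String × String)) :=
  (match s.2 with | some c => s.1 ++ [c] | none => s.1).map PySem.Dict.items

-- the shape A's current_error always has
def pvMkD (m : String) (p : String × String) : PySem.Dict String String :=
  PySem.Dict.mk [("message", m), ("location", p.1), ("suggestion", p.2)]

theorem pvNewErr_eq (line : String) : pvNewErr line = pvMkD (pvErrMsg line) ("", "") := rfl

theorem pvMkD_insert_loc (m : String) (p : String × String) (v : String) :
    (pvMkD m p).insert "location" v = pvMkD m (v, p.2) := by
  simp [pvMkD, PySem.Dict.insert]

theorem pvMkD_insert_sug (m : String) (p : String × String) (v : String) :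
    (pvMkD m p).insert "suggestion" v = pvMkD m (p.1, v) := by
  simp [pvMkD, PySem.Dict.insert]

theorem pvMkD_items (h : String) (body : List String) :
    (pvMkD (pvErrMsg h) (body.foldl pvRenderBody ("", ""))).items = pvRender (h, body) := by
  simp [pvMkD, pvRender]

theorem pvAppendLast_append (g : String × List String) (line : String) :
    ∀ gs, pvAppendLast (gs ++ [g]) line = gs ++ [(g.1, g.2 ++ [line])] := by
  intro gs
  induction gs with
  | nil => rfl
  | cons a gs ih =>
    cases gs with
    | nil => rfl
    | cons b gs' => simpa [pvAppendLast] using ih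

theorem pvGroupStep_err (line : String) (he : pvErrTest line = true)
    (gs : List (String × List String)) :
    pvGroupStep gs line = gs ++ [(line, [])] := by
  simp [pvGroupStep, he]

theorem pvGroupStep_body (line : String) (he : ¬ pvErrTest line = true)
    (gs : List (String × List String)) (g : String × List String) :
    pvGroupStep (gs ++ [g]) line = gs ++ [(g.1, g.2 ++ [line])] := by
  simp [pvGroupStep, he, pvAppendLast_append]

theorem pvGroupFrame :
    ∀ (lines : List String) (gs' l : List (String × List String)), l ≠ [] →
      lines.foldl pvGroupStep (gs' ++ l) = gs' ++ lines.foldl pvGroupStep l := by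
  intro lines
  induction lines with
  | nil => intro _ _ _; rfl
  | cons line rest ih =>
    intro gs' l hl
    rcases List.eq_nil_or_concat l with h | ⟨l', g, h⟩
    · exact absurd h hl
    subst h
    simp only [List.concat_eq_append, List.foldl_cons]
    by_cases he : pvErrTest line = true
    · rw [pvGroupStep_err line he, pvGroupStep_err line he, List.append_assoc]
      exact ih _ _ (by simp)
    · rw [show gs' ++ (l' ++ [g]) = (gs' ++ l') ++ [g] from (List.append_assoc _ _ _).symm,
          pvGroupStep_body line he, pvGroupStep_body line he, List.append_assoc]
      exact ih _ _ (by simp)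

theorem pvLoopSome :
    ∀ (lines : List String) (errors : List (PySem.Dict String String))
      (h : String) (body : List String),
      pvOutA (lines.foldl pvStepA
        (errors, some (pvMkD (pvErrMsg h) (body.foldl pvRenderBody ("", "")))))
      = errors.map PySem.Dict.items ++ (lines.foldl pvGroupStep [(h, body)]).map pvRender := by
  intro lines
  induction lines with
  | nil =>
    intro errors h body
    simp [pvOutA, pvMkD_items h body]
  | cons line rest ih =>
    intro errors h body
    simp only [List.foldl_cons]
    by_cases he : pvErrTest line = true
    · have hA : pvStepA (errors, some (pvMkD (pvErrMsg h) (body.foldl pvRenderBody ("", "")))) line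
          = (errors ++ [pvMkD (pvErrMsg h) (body.foldl pvRenderBody ("", ""))],
             some (pvMkD (pvErrMsg line) (([] : List String).foldl pvRenderBody ("", "")))) := by
        simp [pvStepA, he, pvNewErr_eq]
      rw [hA, pvGroupStep_err line he, ih,
          pvGroupFrame rest [(h, body)] [(line, ([] : List String))] (by simp)]
      simp [pvMkD_items h body]
    · have hB := pvGroupStep_body line he [] (h, body)
      simp only [List.nil_append] at hB
      have hfold : ∀ st : String × String, (body ++ [line]).foldl pvRenderBody st
          = pvRenderBody (body.foldl pvRenderBody st) line := by
        intro st; rw [List.foldl_append]; rfl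
      by_cases ha : PySem.Chars.isIn ['-', '-', '>'] line.toList = true
      · have hA : pvStepA (errors, some (pvMkD (pvErrMsg h) (body.foldl pvRenderBody ("", "")))) line
            = (errors, some (pvMkD (pvErrMsg h) ((body ++ [line]).foldl pvRenderBody ("", "")))) := by
          rw [hfold]
          simp [pvStepA, he, ha, pvMkD_insert_loc, pvRenderBody]
        rw [hA, hB, ih]
      · by_cases hh : PySem.Chars.isIn ['h', 'e', 'l', 'p', ':'] line.toList = true
        · have hA : pvStepA (errors, some (pvMkD (pvErrMsg h) (body.foldl pvRenderBody ("", "")))) line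
              = (errors, some (pvMkD (pvErrMsg h) ((body ++ [line]).foldl pvRenderBody ("", "")))) := by
            rw [hfold]
            simp [pvStepA, he, ha, hh, pvMkD_insert_sug, pvRenderBody]
          rw [hA, hB, ih]
        · have hA : pvStepA (errors, some (pvMkD (pvErrMsg h) (body.foldl pvRenderBody ("", "")))) line
              = (errors, some (pvMkD (pvErrMsg h) ((body ++ [line]).foldl pvRenderBody ("", "")))) := by
            rw [hfold]
            simp [pvStepA, he, ha, hh, pvRenderBody]
          rw [hA, hB, ih]

theorem pvLoopNone :
    ∀ (lines : List String),
      pvOutA (lines.foldl pvStepA ([], none))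
      = (lines.foldl pvGroupStep []).map pvRender := by
  intro lines
  induction lines with
  | nil => rfl
  | cons line rest ih =>
    simp only [List.foldl_cons]
    by_cases he : pvErrTest line = true
    · have hA : pvStepA (([] : List (PySem.Dict String String)), none) line
          = ([], some (pvMkD (pvErrMsg line) (([] : List String).foldl pvRenderBody ("", "")))) := by
        simp [pvStepA, he, pvNewErr_eq]
      have hB : pvGroupStep [] line = [(line, ([] : List String))] := by
        simp [pvGroupStep, he]
      rw [hA, hB, pvLoopSome]
      simp
    · have hA : pvStepA (([] : List (PySem.Dict String String)), none) line
          = ([], none) := by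
        simp [pvStepA, he]
      have hB : pvGroupStep [] line = [] := by
        simp [pvGroupStep, he]
      rw [hA, hB, ih]

-- ===== VERDICT (by name: the statement is the Claim_ definition above) =====
theorem parse_error_details_spec : Claim_equal_parse_error_details := by
  intro stderr _
  show parse_error_details stderr = parse_error_details_alt stderr
  unfold parse_error_details parse_error_details_alt
  exact pvLoopNone (PySem.Str.splitlines stderr)
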